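-- pv_equiv track=rewrite | github.com/Valokoodari/advent-of-code | 2016/solutions/day_07.py | part_1
-- ===== SOURCE A (Python) =====
-- def abba(s):
--     for i in range(len(s)-3):
--         if s[i] == s[i+3] and s[i+1] == s[i+2] and s[i] != s[i+1]:
--             return True
--     return False
--
-- def part_1(data):
--     a, ls = 0, [l.replace("[", ",").replace("]", ",").split(",") for l in data.splitlines()]
--     for l in ls:
--         if any(abba(l[i]) for i in range(1, len(l), 2)):
--             continue
--         if any(abba(l[i]) for i in range(0, len(l), 2)):
--             a += 1
--     return a
-- ===== SOURCE B (Python) =====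
-- def part_1(data):
--     # One streaming pass per line: no splitting into segments, no sliding-window
--     # helper.  '[' , ']' and ',' all end the current segment (exactly the
--     # separators A's replace-then-split uses); a rolling window of the last
--     # characters detects an ABBA in place, and one parity bit says whether we
--     # are inside brackets (odd segment) or outside (even segment).
--     count = 0
--     for line in data.splitlines():
--         window = ""          # last <= 3 chars of the current segment
--         parity = 0           # 0 = supernet segment, 1 = hypernet segment
--         seen = [False, False]  # seen[p]: ABBA found in a segment of parity p
--         for ch in line:
--             if ch in "[],":
--                 parity ^= 1
--                 window = ""
--             else:
--                 w = window + ch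
--                 if len(w) == 4 and w[0] == w[3] and w[1] == w[2] and w[0] != w[1]:
--                     seen[parity] = True
--                 window = w[-3:]
--         if seen[0] and not seen[1]:
--             count += 1
--     return count
-- ===== Notes on version B (the rewrite author's own statement) =====
-- stated objective: alternative
-- what changed: A splits each line into segments via replace/split and runs a separate index-based sliding-window ABBA scan over every segment; B makes a single streaming pass over each line's characters, maintaining a bracket-parity bit and a rolling window of the last three characters, so no segment lists are ever built.
import Mathlib
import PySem

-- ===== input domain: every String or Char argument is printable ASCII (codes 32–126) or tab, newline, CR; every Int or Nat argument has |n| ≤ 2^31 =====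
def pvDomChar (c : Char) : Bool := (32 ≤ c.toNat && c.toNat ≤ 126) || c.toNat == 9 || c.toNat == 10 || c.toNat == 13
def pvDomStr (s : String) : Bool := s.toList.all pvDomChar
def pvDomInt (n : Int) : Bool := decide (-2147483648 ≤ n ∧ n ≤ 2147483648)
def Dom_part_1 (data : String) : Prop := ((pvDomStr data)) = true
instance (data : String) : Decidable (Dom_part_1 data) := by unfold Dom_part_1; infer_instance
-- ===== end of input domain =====

-- B replaces A's split-into-segments plus sliding-window helper by a single streaming
-- pass per line (parity bit for inside/outside brackets, rolling window of the last
-- characters); objective: alternative single-pass structure.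

-- ===== PORT A =====
-- abba(s): sliding-window scan by index (i always in range, so Option-valued pyGet? compares exactly)
def abba (s : List Char) : Bool :=
  (PySem.List.pyRange 0 ((s.length : Int) - 3) 1).any fun i =>
    (PySem.List.pyGet? s i == PySem.List.pyGet? s (i + 3)) &&
    (PySem.List.pyGet? s (i + 1) == PySem.List.pyGet? s (i + 2)) &&
    (PySem.List.pyGet? s i != PySem.List.pyGet? s (i + 1))

def part_1 (data : String) : Int :=
  let ls := (PySem.Chars.splitlines data.toList).map fun l =>
    PySem.Chars.splitOn
      (PySem.Chars.replace (PySem.Chars.replace l "[".toList ",".toList) "]".toList ",".toList)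
      ",".toList
  ls.foldl (fun a l =>
    if (PySem.List.pyRange 1 (l.length : Int) 2).any
        (fun i => abba ((PySem.List.pyGet? l i).getD [])) then a
    else if (PySem.List.pyRange 0 (l.length : Int) 2).any
        (fun i => abba ((PySem.List.pyGet? l i).getD [])) then a + 1
    else a) 0

-- ===== PORT B =====
-- the `len(w) == 4 and w[0] == w[3] and w[1] == w[2] and w[0] != w[1]` test of Source B
def hit4 (w : List Char) : Bool :=
  w.length == 4 &&
  (PySem.List.pyGet? w 0 == PySem.List.pyGet? w 3) &&
  (PySem.List.pyGet? w 1 == PySem.List.pyGet? w 2) &&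
  (PySem.List.pyGet? w 0 != PySem.List.pyGet? w 1)

-- the body of Source B's `for ch in line` loop; state = (parity, window, seen0, seen1)
def tlsStep (st : Bool × List Char × Bool × Bool) (ch : Char) : Bool × List Char × Bool × Bool :=
  let (parity, window, s0, s1) := st
  if PySem.Chars.isIn [ch] "[],".toList then (!parity, [], s0, s1)
  else
    let w := window ++ [ch]
    let hit := hit4 w
    (parity, PySem.List.slice w (some (-3)) none, s0 || (!parity && hit), s1 || (parity && hit))

def part_1_alt (data : String) : Int :=
  (PySem.Chars.splitlines data.toList).foldl (fun count line =>
    let fin := line.foldl tlsStep (false, [], false, false)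
    if fin.2.2.1 && !fin.2.2.2 then count + 1 else count) 0

-- ===== PRECONDITION & SPEC =====
def Spec_part_1 (data : String) (out : Int) : Prop := out = part_1_alt data
instance (data : String) (out : Int) : Decidable (Spec_part_1 data out) := by unfold Spec_part_1; infer_instance

-- ===== CLAIM (what is proved, stated in full; the proofs are below) =====
def Claim_equal_part_1 : Prop := ∀ (data : String), Dom_part_1 data → Spec_part_1 data (part_1 data)

-- ===== LEMMAS AND PROOFS =====

-- separators A's replace/split pipeline cuts at
def isSep (c : Char) : Bool := c == '[' || c == ']' || c == ','

-- combined effect of the two single-char replaces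
def hmap (c : Char) : Char := if c == '[' then ',' else if c == ']' then ',' else c

-- structural split on separators (characterises A's replace+split)
def splitSeps : List Char → List (List Char)
  | [] => [[]]
  | c :: t => if isSep c then [] :: splitSeps t
              else (c :: (splitSeps t).headI) :: (splitSeps t).tail

-- structural ABBA test
def hasAbba : List Char → Bool
  | a :: b :: c :: d :: t => (a == d && b == c && a != b) || hasAbba (b :: c :: d :: t)
  | _ => false

-- any at even / odd positions of a Bool list
mutual
def anyEven : List Bool → Bool
  | [] => false
  | b :: t => b || anyOdd t
def anyOdd : List Bool → Bool
  | [] => false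
  | _ :: t => anyEven t
end

-- keep the last ≤ 3 elements of a list of length ≤ 4 (what w[-3:] does there)
def last3 (w : List Char) : List Char := if w.length ≤ 3 then w else w.tail

-- detection flag produced by scanning cs with initial window w (one segment)
def gWin : List Char → List Char → Bool
  | _, [] => false
  | w, c :: t => hit4 (w ++ [c]) || gWin (last3 (w ++ [c])) t

-- merge a per-segment flag into the (seen0, seen1) pair at the given parity
def mergeAt (p : Bool) (b : Bool) (e : Bool × Bool) : Bool × Bool :=
  if p then (e.1, b || e.2) else (b || e.1, e.2)

-- (seen0, seen1) contributed by a list of whole segments starting at parity p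
def segsFlags : Bool → List (List Char) → Bool × Bool
  | _, [] => (false, false)
  | p, s :: t => mergeAt p (hasAbba s) (segsFlags (!p) t)

-- (seen0, seen1) contributed by the rest of a line, current parity p, window w
def lineFlags : Bool → List Char → List Char → Bool × Bool
  | _, _, [] => (false, false)
  | p, w, c :: t =>
      if isSep c then lineFlags (!p) [] t
      else mergeAt p (hit4 (w ++ [c])) (lineFlags p (last3 (w ++ [c])) t)

-- ---- basic facts ----
theorem cons_headI_tail' {α : Type} [Inhabited α] (l : List α) (h : l ≠ []) :
    l.headI :: l.tail = l := by
  cases l with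
  | nil => exact absurd rfl h
  | cons a t => rfl

theorem splitSeps_ne_nil (l : List Char) : splitSeps l ≠ [] := by
  cases l with
  | nil => simp [splitSeps]
  | cons c t => simp only [splitSeps]; split_ifs <;> simp

theorem splitSeps_cons_ex (l : List Char) : ∃ h0 rest, splitSeps l = h0 :: rest := by
  rcases e : splitSeps l with _ | ⟨h0, rest⟩
  · exact absurd e (splitSeps_ne_nil l)
  · exact ⟨h0, rest, rfl⟩

theorem hasAbba_short (l : List Char) (h : l.length ≤ 3) : hasAbba l = false := by
  rcases l with _ | ⟨a, _ | ⟨b, _ | ⟨c, _ | ⟨d, t⟩⟩⟩⟩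
  · rfl
  · rfl
  · rfl
  · rfl
  · exfalso; simp at h; omega

theorem mergeAt_false (p : Bool) (e : Bool × Bool) : mergeAt p false e = e := by
  cases p <;> simp [mergeAt]

theorem mergeAt_or (p : Bool) (a b : Bool) (e : Bool × Bool) :
    mergeAt p a (mergeAt p b e) = mergeAt p (a || b) e := by
  cases p <;> simp [mergeAt, Bool.or_assoc]

theorem bne_some_some (a b : Char) : (some a != some b) = (a != b) := rfl

-- ---- A side: replace + split = splitSeps ----
theorem hmap_of_sep (c : Char) (h : isSep c = true) : hmap c = ',' := by
  simp [isSep] at h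
  rcases h with (h | h) | h <;> subst h <;> decide

theorem hmap_of_nonsep (c : Char) (h : isSep c = false) : hmap c = c := by
  simp only [isSep, Bool.or_eq_false_iff, beq_eq_false_iff_ne, ne_eq] at h
  obtain ⟨⟨h1, h2⟩, h3⟩ := h
  simp [hmap, h1, h2]

theorem nonsep_ne_comma (c : Char) (h : isSep c = false) : ¬ (c = ',') := by
  simp only [isSep, Bool.or_eq_false_iff, beq_eq_false_iff_ne, ne_eq] at h
  exact h.2

theorem replace_go_map (a b : Char) :
    ∀ (l : List Char) (fuel : Nat) (acc : List Char), l.length ≤ fuel →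
      PySem.Chars.replace.go [a] [b] fuel l acc
        = acc.reverse ++ l.map (fun c => if c == a then b else c) := by
  intro l
  induction l with
  | nil =>
    intro fuel acc h
    cases fuel <;> simp [PySem.Chars.replace.go]
  | cons c t ih =>
    intro fuel acc h
    cases fuel with
    | zero => simp at h
    | succ n =>
      have ht : t.length ≤ n := by simp at h; omega
      by_cases hc : a = c
      · subst hc
        rw [show PySem.Chars.replace.go [a] [b] (n + 1) (a :: t) acc
              = PySem.Chars.replace.go [a] [b] n t (b :: acc) from by
          simp [PySem.Chars.replace.go, List.isPrefixOf]]
        rw [ih n (b :: acc) ht]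
        simp
      · rw [show PySem.Chars.replace.go [a] [b] (n + 1) (c :: t) acc
              = PySem.Chars.replace.go [a] [b] n t (c :: acc) from by
          simp [PySem.Chars.replace.go, List.isPrefixOf, hc]]
        rw [ih n (c :: acc) ht]
        have hc' : ¬ (c = a) := fun hh => hc hh.symm
        simp [hc']

theorem replace_single (l : List Char) (a b : Char) :
    PySem.Chars.replace l [a] [b] = l.map (fun c => if c == a then b else c) := by
  simp [PySem.Chars.replace, replace_go_map a b l l.length [] (le_refl _)]

theorem splitOn_go_seps :
    ∀ (l : List Char) (fuel : Nat) (cur : List Char) (acc : List (List Char)),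
      l.length < fuel →
      PySem.Chars.splitOn.go [','] fuel (l.map hmap) cur acc
        = acc.reverse ++ ((cur.reverse ++ (splitSeps l).headI) :: (splitSeps l).tail) := by
  intro l
  induction l with
  | nil =>
    intro fuel cur acc h
    cases fuel with
    | zero => simp at h
    | succ n => simp [PySem.Chars.splitOn.go, splitSeps]
  | cons c t ih =>
    intro fuel cur acc h
    cases fuel with
    | zero => simp at h
    | succ n =>
      have ht : t.length < n := by simp at h; omega
      obtain ⟨h0, rest, hs⟩ := splitSeps_cons_ex t
      by_cases hc : isSep c = true
      · have hm : hmap c = ',' := hmap_of_sep c hc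
        simp only [List.map_cons, hm, splitSeps, hc, if_true]
        rw [show PySem.Chars.splitOn.go [','] (n + 1) (',' :: t.map hmap) cur acc
              = PySem.Chars.splitOn.go [','] n (t.map hmap) [] (cur.reverse :: acc) from by
          simp [PySem.Chars.splitOn.go, List.isPrefixOf]]
        rw [ih n [] (cur.reverse :: acc) ht]
        simp [hs]
      · have hc' : isSep c = false := Bool.eq_false_iff.mpr hc
        have hm : hmap c = c := hmap_of_nonsep c hc'
        have hcc : ¬ (c = ',') := nonsep_ne_comma c hc'
        have hcc2 : ¬ (',' = c) := fun hh => hcc hh.symm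
        simp only [List.map_cons, hm, splitSeps, hc', Bool.false_eq_true, if_false]
        rw [show PySem.Chars.splitOn.go [','] (n + 1) (c :: t.map hmap) cur acc
              = PySem.Chars.splitOn.go [','] n (t.map hmap) (c :: cur) acc from by
          simp [PySem.Chars.splitOn.go, List.isPrefixOf, hcc2]]
        rw [ih n (c :: cur) acc ht]
        simp [hs]

theorem comp_hmap (c : Char) :
    (fun x => if x == ']' then ',' else x) ((fun x => if x == '[' then ',' else x) c) = hmap c := by
  by_cases h1 : c = '['
  · subst h1; decide
  · by_cases h2 : c = ']'
    · subst h2; decide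
    · simp [hmap, h1, h2]

theorem parse_eq_splitSeps (l : List Char) :
    PySem.Chars.splitOn
      (PySem.Chars.replace (PySem.Chars.replace l "[".toList ",".toList) "]".toList ",".toList)
      ",".toList = splitSeps l := by
  have e1 : ("[".toList : List Char) = ['['] := rfl
  have e2 : ("]".toList : List Char) = [']'] := rfl
  have e3 : (",".toList : List Char) = [','] := rfl
  rw [e1, e2, e3, replace_single, replace_single, List.map_map]
  have e4 : ((fun x => if x == ']' then ',' else x) ∘ (fun x => if x == '[' then ',' else x))
      = hmap := by funext c; exact comp_hmap c
  rw [e4]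
  have hgo := splitOn_go_seps l ((l.map hmap).length + 1) [] [] (by simp)
  simp only [PySem.Chars.splitOn]
  rw [hgo]
  simp [cons_headI_tail' _ (splitSeps_ne_nil l)]

-- ---- A side: abba = hasAbba ----
theorem pyRange_one_sub3 (n : Nat) :
    PySem.List.pyRange 0 ((n : Int) - 3) 1
      = List.map (fun k : Nat => (k : Int)) (List.range (n - 3)) := by
  unfold PySem.List.pyRange
  rw [if_neg (by norm_num : ¬ ((1:Int) = 0))]
  rw [if_pos (by norm_num : (0:Int) < 1)]
  rw [show (if (0:Int) < (n : Int) - 3 then (((n : Int) - 3 - 0 + 1 - 1) / 1).toNat else 0)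
        = n - 3 from by split_ifs <;> omega]
  dsimp only
  apply List.map_congr_left
  intro k _
  ring

theorem abbaCore (s : List Char) :
    ((List.range (s.length - 3)).any fun k =>
      (s[k]? == s[k + 3]?) && (s[k + 1]? == s[k + 2]?) && (s[k]? != s[k + 1]?)) = hasAbba s := by
  induction s with
  | nil => rfl
  | cons x t ih =>
    by_cases h3 : 3 ≤ t.length
    · rcases t with _ | ⟨b, t⟩
      · simp at h3
      rcases t with _ | ⟨c, t⟩
      · simp at h3
      rcases t with _ | ⟨d, t⟩
      · simp at h3
      have hlen : (x :: b :: c :: d :: t).length - 3 = t.length + 1 := by simp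
      have hlen2 : (b :: c :: d :: t).length - 3 = t.length := by simp
      rw [hlen, List.range_succ_eq_map, List.any_cons, List.any_map]
      have hshift : ((fun k =>
            ((x :: b :: c :: d :: t)[k]? == (x :: b :: c :: d :: t)[k + 3]?) &&
            ((x :: b :: c :: d :: t)[k + 1]? == (x :: b :: c :: d :: t)[k + 2]?) &&
            ((x :: b :: c :: d :: t)[k]? != (x :: b :: c :: d :: t)[k + 1]?)) ∘ Nat.succ)
          = fun k =>
            ((b :: c :: d :: t)[k]? == (b :: c :: d :: t)[k + 3]?) &&
            ((b :: c :: d :: t)[k + 1]? == (b :: c :: d :: t)[k + 2]?) &&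
            ((b :: c :: d :: t)[k]? != (b :: c :: d :: t)[k + 1]?) := by
        funext k
        simp [Nat.succ_eq_add_one]
      rw [hshift]
      rw [hlen2] at ih
      rw [ih]
      all_goals simp [hasAbba, Bool.and_assoc, bne_some_some]
    · have hlen : (x :: t).length - 3 = 0 := by simp; omega
      rw [hlen, List.range_zero]
      simp only [List.any_nil]
      exact (hasAbba_short _ (by simp; omega)).symm

theorem abba_eq_hasAbba (s : List Char) : abba s = hasAbba s := by
  unfold abba
  rw [pyRange_one_sub3, List.any_map]
  refine Eq.trans (congrArg (List.any (List.range (s.length - 3)))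
      (funext fun k => ?_)) (abbaCore s)
  simp only [Function.comp_apply]
  rw [show ((k : Int) + 3) = ((k + 3 : Nat) : Int) from by push_cast; ring]
  rw [show ((k : Int) + 1) = ((k + 1 : Nat) : Int) from by push_cast; ring]
  rw [show ((k : Int) + 2) = ((k + 2 : Nat) : Int) from by push_cast; ring]
  simp only [PySem.List.pyGet?_natCast]

-- ---- A side: strided any = anyEven / anyOdd ----
theorem pyRange_two_even (n : Nat) :
    PySem.List.pyRange 0 (n : Int) 2
      = List.map (fun k : Nat => ((2 * k : Nat) : Int)) (List.range ((n + 1) / 2)) := by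
  unfold PySem.List.pyRange
  rw [if_neg (by norm_num : ¬ ((2:Int) = 0))]
  rw [if_pos (by norm_num : (0:Int) < 2)]
  rw [show (if (0:Int) < (n : Int) then (((n : Int) - 0 + 2 - 1) / 2).toNat else 0)
        = (n + 1) / 2 from by split_ifs <;> omega]
  dsimp only
  apply List.map_congr_left
  intro k _
  push_cast
  ring

theorem pyRange_two_odd (n : Nat) :
    PySem.List.pyRange 1 (n : Int) 2
      = List.map (fun k : Nat => ((2 * k + 1 : Nat) : Int)) (List.range (n / 2)) := by
  unfold PySem.List.pyRange
  rw [if_neg (by norm_num : ¬ ((2:Int) = 0))]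
  rw [if_pos (by norm_num : (0:Int) < 2)]
  rw [show (if (1:Int) < (n : Int) then (((n : Int) - 1 + 2 - 1) / 2).toNat else 0)
        = n / 2 from by split_ifs <;> omega]
  dsimp only
  apply List.map_congr_left
  intro k _
  push_cast
  ring

theorem any_stride_core {α : Type} (l : List α) (q : α → Bool) (d : α) :
    (((List.range ((l.length + 1) / 2)).any fun k => q ((l[2 * k]?).getD d)) = anyEven (l.map q))
    ∧ (((List.range (l.length / 2)).any fun k => q ((l[2 * k + 1]?).getD d)) = anyOdd (l.map q)) := by
  induction l with
  | nil => constructor <;> simp [anyEven, anyOdd]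
  | cons x t ih =>
    constructor
    · have hc : ((x :: t).length + 1) / 2 = t.length / 2 + 1 := by simp; omega
      rw [hc, List.range_succ_eq_map, List.any_cons, List.any_map]
      have hshift : ((fun k => q (((x :: t)[2 * k]?).getD d)) ∘ Nat.succ)
          = fun k => q ((t[2 * k + 1]?).getD d) := by
        funext k
        have h2 : 2 * Nat.succ k = (2 * k + 1) + 1 := by omega
        simp [h2]
      rw [hshift, ih.2]
      all_goals simp [anyEven]
    · have hc : (x :: t).length / 2 = (t.length + 1) / 2 := by simp
      rw [hc]
      have hshift : (fun k => q (((x :: t)[2 * k + 1]?).getD d))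
          = fun k => q ((t[2 * k]?).getD d) := by
        funext k
        simp
      rw [hshift, ih.1]
      all_goals simp [anyOdd]

theorem segsFlags_spec (segs : List (List Char)) :
    segsFlags false segs = (anyEven (segs.map hasAbba), anyOdd (segs.map hasAbba))
    ∧ segsFlags true segs = (anyOdd (segs.map hasAbba), anyEven (segs.map hasAbba)) := by
  induction segs with
  | nil => constructor <;> rfl
  | cons s t ih =>
    constructor <;> simp [segsFlags, mergeAt, ih.1, ih.2, anyEven, anyOdd]

theorem any_even_abba (l : List (List Char)) :
    ((PySem.List.pyRange 0 (l.length : Int) 2).any fun i => abba ((PySem.List.pyGet? l i).getD []))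
      = anyEven (l.map hasAbba) := by
  rw [pyRange_two_even, List.any_map]
  refine Eq.trans (congrArg (List.any (List.range ((l.length + 1) / 2)))
      (funext fun k => ?_)) ((any_stride_core l hasAbba []).1)
  simp only [Function.comp_apply, PySem.List.pyGet?_natCast, abba_eq_hasAbba]

theorem any_odd_abba (l : List (List Char)) :
    ((PySem.List.pyRange 1 (l.length : Int) 2).any fun i => abba ((PySem.List.pyGet? l i).getD []))
      = anyOdd (l.map hasAbba) := by
  rw [pyRange_two_odd, List.any_map]
  refine Eq.trans (congrArg (List.any (List.range (l.length / 2)))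
      (funext fun k => ?_)) ((any_stride_core l hasAbba []).2)
  simp only [Function.comp_apply, PySem.List.pyGet?_natCast, abba_eq_hasAbba]

-- ---- B side ----
theorem isIn_eq_isSep (ch : Char) : PySem.Chars.isIn [ch] ['[', ']', ','] = isSep ch := by
  by_cases h : isSep ch = true
  · rw [h, PySem.Chars.isIn_iff_infix]
    have hm : ch ∈ ['[', ']', ','] := by
      simp [isSep] at h
      rcases h with (h | h) | h <;> subst h <;> decide
    obtain ⟨l1, l2, hsplit⟩ := List.append_of_mem hm
    exact ⟨l1, l2, by rw [hsplit]; simp⟩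
  · have h' : isSep ch = false := Bool.eq_false_iff.mpr h
    rw [h']
    cases hh : PySem.Chars.isIn [ch] ['[', ']', ','] with
    | false => rfl
    | true =>
      exfalso
      obtain ⟨l1, l2, hsplit⟩ := (PySem.Chars.isIn_iff_infix _ _).mp hh
      have hm : ch ∈ ['[', ']', ','] := by rw [← hsplit]; simp
      simp only [isSep, Bool.or_eq_false_iff, beq_eq_false_iff_ne, ne_eq] at h'
      simp at hm
      tauto

theorem slice_last3 (w : List Char) (h : w.length ≤ 4) :
    PySem.List.slice w (some (-3)) none = last3 w := by
  rcases w with _ | ⟨a, _ | ⟨b, _ | ⟨c, _ | ⟨d, _ | ⟨e, t⟩⟩⟩⟩⟩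
  · rfl
  · rfl
  · rfl
  · rfl
  · rfl
  · exfalso; simp at h; omega

theorem last3_len (w : List Char) (h : w.length ≤ 4) : (last3 w).length ≤ 3 := by
  simp only [last3]
  split_ifs with h3
  · exact h3
  · simp [List.length_tail]; omega

theorem foldB_flags :
    ∀ (cs : List Char) (p : Bool) (w : List Char) (s0 s1 : Bool), w.length ≤ 3 →
      (cs.foldl tlsStep (p, w, s0, s1)).2.2
        = (s0 || (lineFlags p w cs).1, s1 || (lineFlags p w cs).2) := by
  intro cs
  induction cs with
  | nil => intro p w s0 s1 hw; simp [lineFlags]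
  | cons c t ih =>
    intro p w s0 s1 hw
    rw [List.foldl_cons]
    by_cases hc : isSep c = true
    · have hstep : tlsStep (p, w, s0, s1) c = (!p, [], s0, s1) := by
        simp [tlsStep, isIn_eq_isSep, hc]
      rw [hstep, ih (!p) [] s0 s1 (by simp)]
      simp [lineFlags, hc]
    · have hc' : isSep c = false := Bool.eq_false_iff.mpr hc
      have hw4 : (w ++ [c]).length ≤ 4 := by simp; omega
      have hstep : tlsStep (p, w, s0, s1) c
          = (p, last3 (w ++ [c]), s0 || (!p && hit4 (w ++ [c])), s1 || (p && hit4 (w ++ [c]))) := by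
        simp [tlsStep, isIn_eq_isSep, hc', slice_last3 _ hw4]
      rw [hstep, ih p (last3 (w ++ [c])) _ _ (last3_len _ hw4)]
      simp only [lineFlags, hc', Bool.false_eq_true, if_false]
      cases p <;> simp [mergeAt, Bool.or_assoc]

theorem gWin_eq (s : List Char) : ∀ (w : List Char), w.length ≤ 3 → gWin w s = hasAbba (w ++ s) := by
  induction s with
  | nil =>
    intro w hw
    simp [gWin, hasAbba_short w hw]
  | cons c t ih =>
    intro w hw
    simp only [gWin]
    by_cases h3 : w.length ≤ 2
    · have hne3 : ¬ (w.length = 3) := by omega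
      have hit : hit4 (w ++ [c]) = false := by
        simp [hit4, hne3]
      have hl3 : last3 (w ++ [c]) = w ++ [c] := by
        simp [last3]; omega
      rw [hit, hl3, ih (w ++ [c]) (by simp; omega)]
      simp
    · have hw3 : w.length = 3 := by omega
      obtain ⟨a, b, d, rfl⟩ : ∃ a b d, w = [a, b, d] := by
        rcases w with _ | ⟨a, _ | ⟨b, _ | ⟨d, _ | ⟨e, w⟩⟩⟩⟩
        · simp at hw3
        · simp at hw3
        · simp at hw3
        · exact ⟨a, b, d, rfl⟩
        · exfalso; simp at hw3
      have hhit : hit4 ([a, b, d] ++ [c]) = ((a == c) && (b == d) && (a != b)) := by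
        simp [hit4, PySem.List.pyGet?, PySem.List.pyIdx?, bne_some_some]
      have hl3 : last3 ([a, b, d] ++ [c]) = [b, d, c] := by
        simp [last3]
      rw [hhit, hl3, ih [b, d, c] (by simp)]
      all_goals simp [hasAbba, Bool.and_assoc]

theorem lineFlags_eq (cs : List Char) :
    ∀ (p : Bool) (w : List Char),
      lineFlags p w cs
        = mergeAt p (gWin w (splitSeps cs).headI) (segsFlags (!p) (splitSeps cs).tail) := by
  induction cs with
  | nil =>
    intro p w
    simp [lineFlags, splitSeps, gWin, segsFlags, mergeAt_false]
  | cons c t ih =>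
    intro p w
    obtain ⟨h0, rest, hs⟩ := splitSeps_cons_ex t
    by_cases hc : isSep c = true
    · simp only [lineFlags, hc, if_true, splitSeps]
      rw [ih (!p) [], hs]
      simp only [List.headI, List.tail_cons]
      rw [gWin_eq h0 [] (by simp), List.nil_append]
      rw [show gWin w ([] : List Char) = false from rfl, mergeAt_false]
      simp [segsFlags]
    · have hc' : isSep c = false := Bool.eq_false_iff.mpr hc
      simp only [lineFlags, hc', Bool.false_eq_true, if_false, splitSeps]
      rw [ih p (last3 (w ++ [c])), hs]
      simp only [List.headI, List.tail_cons]
      rw [mergeAt_or]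
      rfl

theorem lineFlags_top (line : List Char) :
    lineFlags false [] line = segsFlags false (splitSeps line) := by
  obtain ⟨h0, rest, hs⟩ := splitSeps_cons_ex line
  rw [lineFlags_eq, hs]
  simp only [List.headI, List.tail_cons]
  rw [gWin_eq h0 [] (by simp), List.nil_append]
  simp [segsFlags]

-- ---- glue ----
theorem foldl_funeq {α β : Type} (f g : α → β → α) (h : ∀ a b, f a b = g a b) :
    ∀ (l : List β) (a : α), l.foldl f a = l.foldl g a := by
  intro l
  induction l with
  | nil => intro a; rfl
  | cons x t ih => intro a; rw [List.foldl_cons, List.foldl_cons, h, ih]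

theorem line_count_eq (a : Int) (line : List Char) :
    (if (PySem.List.pyRange 1 ((splitSeps line).length : Int) 2).any
          (fun i => abba ((PySem.List.pyGet? (splitSeps line) i).getD [])) then a
     else if (PySem.List.pyRange 0 ((splitSeps line).length : Int) 2).any
          (fun i => abba ((PySem.List.pyGet? (splitSeps line) i).getD [])) then a + 1
     else a)
    = (if (line.foldl tlsStep (false, [], false, false)).2.2.1
           && !(line.foldl tlsStep (false, [], false, false)).2.2.2 then a + 1 else a) := by
  have hB := foldB_flags line false [] false false (by simp)
  have hTop := lineFlags_top line
  have h1 : (line.foldl tlsStep (false, [], false, false)).2.2.1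
      = anyEven ((splitSeps line).map hasAbba) := by
    have h := congrArg Prod.fst hB
    simp only [Bool.false_or] at h
    rw [h, hTop, (segsFlags_spec _).1]
  have h2 : (line.foldl tlsStep (false, [], false, false)).2.2.2
      = anyOdd ((splitSeps line).map hasAbba) := by
    have h := congrArg Prod.snd hB
    simp only [Bool.false_or] at h
    rw [h, hTop, (segsFlags_spec _).1]
  rw [any_odd_abba, any_even_abba, h1, h2]
  cases anyOdd ((splitSeps line).map hasAbba) <;>
    cases anyEven ((splitSeps line).map hasAbba) <;> simp

-- ===== VERDICT (by name: the statement is the Claim_ definition above) =====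
theorem part_1_spec : Claim_equal_part_1 := by
  intro data _
  show part_1 data = part_1_alt data
  simp only [part_1, part_1_alt]
  rw [List.foldl_map]
  refine foldl_funeq _ _ ?_ _ 0
  intro a line
  rw [parse_eq_splitSeps]
  exact line_count_eq a line
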